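-- pv_equiv track=rewrite | github.com/HoangNguyen0309/RubberDuck | app.py | getUsableTags
-- ===== SOURCE A (Python) =====
-- def getUsableTags(tags):
--     workingTags = ""
--     originalTag = tags
--     for i in range(len(tags)):
--         if originalTag[i] == " ":
--             workingTags = workingTags + "_"
--         else:
--             workingTags = workingTags + originalTag[i]
--     return workingTags
-- ===== SOURCE B (Python) =====
-- def getUsableTags(tags):
--     return "_".join(tags.split(" "))
-- ===== Notes on version B (the rewrite author's own statement) =====
-- stated objective: idiomatic
-- what changed: Replaces the index-by-index scan with repeated string concatenation by a tokenize-then-join: split the string on the space separator and join the pieces with the underscore, one underscore per original space.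
import Mathlib
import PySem

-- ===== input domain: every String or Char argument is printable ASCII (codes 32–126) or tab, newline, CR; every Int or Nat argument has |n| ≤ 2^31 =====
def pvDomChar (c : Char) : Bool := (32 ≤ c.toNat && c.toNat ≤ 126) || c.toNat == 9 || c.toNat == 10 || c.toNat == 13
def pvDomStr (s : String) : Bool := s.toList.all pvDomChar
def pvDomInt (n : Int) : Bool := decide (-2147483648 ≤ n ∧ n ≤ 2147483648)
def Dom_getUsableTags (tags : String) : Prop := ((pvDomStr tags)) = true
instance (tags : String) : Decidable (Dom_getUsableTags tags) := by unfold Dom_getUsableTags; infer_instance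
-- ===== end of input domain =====

-- B replaces A's index-by-index scan (quadratic string concatenation) by split-on-space then join-with-underscore; objective: idiomatic.

-- ===== PORT A =====
-- literal port: for i in range(len(tags)): append '_' if originalTag[i] == ' ' else originalTag[i]
def getUsableTags (tags : String) : String :=
  let originalTag := tags.toList
  let workingTags : List Char :=
    (PySem.List.pyRange 0 (PySem.Str.len tags) 1).foldl
      (fun w i =>
        match PySem.List.pyGet? originalTag i with
        | some c => if c == ' ' then w ++ ['_'] else w ++ [c]
        | none => w)   -- unreachable: i ∈ range(len(tags))
      []
  String.ofList workingTags

-- ===== PORT B =====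
-- literal port of Source B: "_".join(tags.split(" "))
def getUsableTags_alt (tags : String) : String :=
  PySem.Str.join "_" ((PySem.Str.split? tags " ").getD [])

-- ===== PRECONDITION & SPEC =====
def Spec_getUsableTags (tags : String) (out : String) : Prop := out = getUsableTags_alt tags
instance (tags : String) (out : String) : Decidable (Spec_getUsableTags tags out) := by unfold Spec_getUsableTags; infer_instance

-- ===== CLAIM (what is proved, stated in full; the proofs are below) =====
def Claim_equal_getUsableTags : Prop := ∀ (tags : String), Dom_getUsableTags tags → Spec_getUsableTags tags (getUsableTags tags)

-- ===== LEMMAS AND PROOFS =====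

-- the character substitution both programs perform
def pvSub (c : Char) : Char := if c == ' ' then '_' else c

-- A's loop is the map of pvSub over the characters
lemma pvA_eq_map (tags : String) :
    getUsableTags tags = String.ofList (tags.toList.map pvSub) := by
  unfold getUsableTags
  have hcongr :
      (PySem.List.pyRange 0 (PySem.Str.len tags) 1).foldl
        (fun (w : List Char) i =>
          match PySem.List.pyGet? tags.toList i with
          | some c => if c == ' ' then w ++ ['_'] else w ++ [c]
          | none => w) []
      = (PySem.List.pyRange 0 (PySem.Str.len tags) 1).foldl
        (fun (w : List Char) i => w ++ [pvSub (PySem.List.pyGetD tags.toList i ' ')]) [] := by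
    apply PySem.List.foldl_congr_mem
    intro acc x hx
    rw [PySem.List.mem_pyRange_one] at hx
    have hlt : x < (tags.toList.length : Int) := by
      simpa [PySem.Str.len_eq] using hx.2
    have hget : PySem.List.pyGet? tags.toList x = some (tags.toList[x.toNat]'(by omega)) := by
      obtain ⟨n, rfl⟩ := Int.eq_ofNat_of_zero_le hx.1
      rw [PySem.List.pyGet?_natCast]
      simp [List.getElem?_eq_getElem (by omega : n < tags.toList.length)]
    have hgetD : PySem.List.pyGetD tags.toList x ' ' = tags.toList[x.toNat]'(by omega) := by
      simp [PySem.List.pyGetD, hget]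
    rw [hget, hgetD]
    by_cases h : tags.toList[x.toNat]'(by omega) == ' ' <;> simp [pvSub, h]
  show String.ofList
      ((PySem.List.pyRange 0 (PySem.Str.len tags) 1).foldl
        (fun (w : List Char) i =>
          match PySem.List.pyGet? tags.toList i with
          | some c => if c == ' ' then w ++ ['_'] else w ++ [c]
          | none => w) [])
    = String.ofList (tags.toList.map pvSub)
  rw [hcongr]
  have hlen : PySem.Str.len tags = (tags.toList.length : Int) := by
    simp [PySem.Str.len_eq]
  rw [hlen, PySem.List.foldl_pyRange_zero_pyGetD' tags.toList ' '
    (fun (w : List Char) c => w ++ [pvSub c]) []]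
  congr 1
  induction tags.toList using List.reverseRecOn with
  | nil => simp
  | append_singleton xs x ih => simp [ih]

-- join merges two adjacent pieces into one piece carrying the separator
lemma pvJoin_merge (sep : List Char) (xs : List (List Char)) (a b : List Char) :
    PySem.Chars.join sep (xs ++ [a, b]) = PySem.Chars.join sep (xs ++ [a ++ sep ++ b]) := by
  induction xs with
  | nil =>
    rw [List.nil_append, List.nil_append, PySem.Chars.join_cons_cons,
      PySem.Chars.join_singleton, PySem.Chars.join_singleton]
  | cons x xs ih =>
    obtain ⟨q, rest, hq⟩ := List.exists_cons_of_ne_nil (by simp : xs ++ [a, b] ≠ [])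
    obtain ⟨q', rest', hq'⟩ := List.exists_cons_of_ne_nil (by simp : xs ++ [a ++ sep ++ b] ≠ [])
    rw [List.cons_append, List.cons_append, hq, PySem.Chars.join_cons_cons, ← hq,
      hq', PySem.Chars.join_cons_cons, ← hq', ih]

-- join with '_' of splitOn ' ' equals the map of pvSub (proved via the go worker)
lemma pvGo_join (l : List Char) : ∀ (fuel : Nat) (cur : List Char) (acc : List (List Char)),
    l.length < fuel →
    PySem.Chars.join ['_'] (PySem.Chars.splitOn.go [' '] fuel l cur acc)
      = PySem.Chars.join ['_'] ((cur.reverse ++ l.map pvSub) :: acc).reverse := by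
  induction l with
  | nil =>
    intro fuel cur acc hf
    match fuel, hf with
    | fuel + 1, _ => simp [PySem.Chars.splitOn.go]
  | cons c rest ih =>
    intro fuel cur acc hf
    match fuel, hf with
    | fuel + 1, hf =>
      show PySem.Chars.join ['_']
        (if [' '].isPrefixOf (c :: rest) then
            PySem.Chars.splitOn.go [' '] fuel (List.drop [' '].length (c :: rest)) [] (cur.reverse :: acc)
          else PySem.Chars.splitOn.go [' '] fuel rest (c :: cur) acc) = _
      by_cases hc : c = ' '
      · subst hc
        rw [if_pos (by simp [List.isPrefixOf])]
        have hdrop : List.drop [' '].length (' ' :: rest) = rest := rfl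
        rw [hdrop]
        rw [ih fuel [] (cur.reverse :: acc) (by simpa using Nat.lt_of_succ_lt_succ hf)]
        rw [show ((List.reverse ([] : List Char) ++ List.map pvSub rest) :: cur.reverse :: acc).reverse
            = acc.reverse ++ [cur.reverse, List.map pvSub rest] by simp]
        rw [show ((cur.reverse ++ List.map pvSub (' ' :: rest)) :: acc).reverse
            = acc.reverse ++ [cur.reverse ++ ['_'] ++ List.map pvSub rest] by simp [pvSub]]
        exact pvJoin_merge ['_'] acc.reverse cur.reverse (List.map pvSub rest)
      · rw [if_neg (by simp [List.isPrefixOf, Ne.symm hc])]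
        rw [ih fuel (c :: cur) acc (by simpa using Nat.lt_of_succ_lt_succ hf)]
        simp [pvSub, hc]

lemma pvB_eq_map (tags : String) :
    getUsableTags_alt tags = String.ofList (tags.toList.map pvSub) := by
  unfold getUsableTags_alt
  apply String.toList_injective
  rw [PySem.Str.toList_join]
  have hsplit : PySem.Str.split? tags " " = some ((PySem.Chars.splitOn tags.toList [' ']).map String.ofList) := by
    simp [PySem.Str.split?, PySem.Chars.split?]
  rw [hsplit]
  have hml : ∀ ps : List (List Char), (ps.map String.ofList).map String.toList = ps := by
    intro ps; simp [Function.comp_def]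
  simp only [Option.getD_some, hml]
  have := pvGo_join tags.toList (tags.toList.length + 1) [] [] (by omega)
  simpa [PySem.Chars.splitOn] using this

-- ===== VERDICT (by name: the statement is the Claim_ definition above) =====
theorem getUsableTags_spec : Claim_equal_getUsableTags := by
  intro tags _
  show getUsableTags tags = getUsableTags_alt tags
  rw [pvA_eq_map, pvB_eq_map]
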